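-- pv_equiv track=rewrite | github.com/pengjunlong/hw | v2ray/scrape.py | get_protocol_type
-- ===== SOURCE A (Python) =====
-- def get_protocol_type(link):
--     """
--     获取链接的协议类型，用于排序
--     返回协议的优先级数字（数字越小排序越靠前）
--     """
--     protocol_order = {
--         'vmess://': 0,
--         'vless://': 1,
--         'trojan://': 2,
--         'shadowsocks://': 3,
--         'ss://': 4,
--         'hysteria2://': 5,
--     }
--
--     for protocol, order in protocol_order.items():
--         if link.startswith(protocol):
--             return order
--
--     # 未知协议排在最后
--     return 999
-- ===== SOURCE B (Python) =====
-- def get_protocol_type(link):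
--     """
--     获取链接的协议类型，用于排序
--     返回协议的优先级数字（数字越小排序越靠前）
--     """
--     protocol_order = {
--         'vmess://': 0,
--         'vless://': 1,
--         'trojan://': 2,
--         'shadowsocks://': 3,
--         'ss://': 4,
--         'hysteria2://': 5,
--     }
--     idx = link.find('://')
--     if idx == -1:
--         return 999
--     return protocol_order.get(link[:idx + 3], 999)
-- ===== Notes on version B (the rewrite author's own statement) =====
-- stated objective: idiomatic
-- what changed: Replaces the per-key startswith scan with a single separator search that extracts the scheme prefix, followed by one dict lookup.
import Mathlib
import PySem

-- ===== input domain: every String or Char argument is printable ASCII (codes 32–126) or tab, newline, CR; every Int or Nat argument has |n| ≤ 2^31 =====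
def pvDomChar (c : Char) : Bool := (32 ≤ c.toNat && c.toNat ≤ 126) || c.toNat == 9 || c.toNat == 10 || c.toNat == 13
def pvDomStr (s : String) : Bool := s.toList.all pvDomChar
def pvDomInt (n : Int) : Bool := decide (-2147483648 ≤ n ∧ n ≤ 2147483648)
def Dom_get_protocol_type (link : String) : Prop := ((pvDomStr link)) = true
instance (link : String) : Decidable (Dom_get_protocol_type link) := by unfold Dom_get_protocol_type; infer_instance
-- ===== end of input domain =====

-- B replaces A's per-key startswith scan with a single separator search extracting the scheme prefix plus one dict lookup.


-- ===== PORT A =====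
-- A's loop over protocol_order.items(): first key that link startswith wins, else 999
def pvScanA (link : String) : List (String × Int) → Int
  | [] => 999
  | (protocol, order) :: rest =>
      if PySem.Str.startswith link protocol then order else pvScanA link rest

def get_protocol_type (link : String) : Int :=
  pvScanA link (PySem.Dict.ofList
    [("vmess://", 0), ("vless://", 1), ("trojan://", 2),
     ("shadowsocks://", 3), ("ss://", 4), ("hysteria2://", 5)]).items

-- ===== PORT B =====
def get_protocol_type_alt (link : String) : Int :=
  let protocol_order : PySem.Dict String Int :=
    PySem.Dict.ofList
      [("vmess://", 0), ("vless://", 1), ("trojan://", 2),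
       ("shadowsocks://", 3), ("ss://", 4), ("hysteria2://", 5)]
  let idx := PySem.Str.find link "://"
  if idx = -1 then 999
  else protocol_order.getD (PySem.Str.slice link none (some (idx + 3))) 999


-- ===== PRECONDITION & SPEC =====
def Spec_get_protocol_type (link : String) (out : Int) : Prop := out = get_protocol_type_alt link
instance (link : String) (out : Int) : Decidable (Spec_get_protocol_type link out) := by unfold Spec_get_protocol_type; infer_instance

-- ===== CLAIM (what is proved, stated in full; the proofs are below) =====
def Claim_equal_get_protocol_type : Prop := ∀ (link : String), Dom_get_protocol_type link → Spec_get_protocol_type link (get_protocol_type link)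

-- ===== LEMMAS AND PROOFS =====

def pvSep : List Char := [':', '/', '/']

lemma pv_find_of_key_prefix (scheme rest : List Char) (hns : ':' ∉ scheme) :
    PySem.Chars.find (scheme ++ pvSep ++ rest) pvSep = (scheme.length : Int) := by
  set big := scheme ++ pvSep ++ rest with hbig
  have hinfix : pvSep <:+: big := ⟨scheme, rest, rfl⟩
  have h0 : 0 ≤ PySem.Chars.find big pvSep := (PySem.Chars.find_nonneg_iff _ _).2 hinfix
  obtain ⟨hpre, hmin⟩ := PySem.Chars.find_spec h0
  have hat : pvSep <+: List.drop scheme.length big := by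
    rw [hbig, List.append_assoc, List.drop_left]
    exact ⟨rest, rfl⟩
  have hnot : ∀ i < scheme.length, ¬ pvSep <+: List.drop i big := by
    intro i hi hp
    have h1 : big[i]'(by simp [hbig]; omega) = ':' := by
      have := hp.getElem (i := 0) (by simp [pvSep])
      simpa [pvSep, List.getElem_drop] using this.symm
    have h2 : big[i]'(by simp [hbig]; omega) = scheme[i]'hi := by
      simp only [hbig]
      rw [List.getElem_append_left (by simpa using Nat.lt_of_lt_of_le hi (by simp)),
          List.getElem_append_left hi]
    have h3 : scheme[i]'hi = ':' := h2.symm.trans h1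
    exact hns (h3 ▸ List.getElem_mem _)
  have heq : (PySem.Chars.find big pvSep).toNat = scheme.length := by
    by_contra hne
    rcases Nat.lt_or_ge (PySem.Chars.find big pvSep).toNat scheme.length with h | h
    · exact hnot _ h hpre
    · exact hmin scheme.length (lt_of_le_of_ne h (Ne.symm hne) |>.trans_le (le_refl _)) hat
  omega

lemma pv_hit (link scheme key : String) (n : Nat)
    (hk : key.toList = scheme.toList ++ pvSep) (hn : scheme.toList.length = n)
    (hns : ':' ∉ scheme.toList)
    (hpre : key.toList <+: link.toList) :
    PySem.Str.find link "://" = (n : Int) ∧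
    PySem.Str.slice link none (some ((n : Int) + 3)) = key := by
  obtain ⟨rest, hr⟩ := hpre
  have hsep : ("://" : String).toList = pvSep := by decide
  have hl : link.toList = scheme.toList ++ pvSep ++ rest := by
    rw [← hr, hk]
  constructor
  · rw [PySem.Str.find_eq, hsep, hl, pv_find_of_key_prefix _ _ hns, hn]
  · rw [← String.toList_inj, PySem.Str.toList_slice, PySem.Chars.slice_eq_listSlice]
    have hcast : ((n : Int) + 3) = ((n + 3 : Nat) : Int) := by push_cast; ring
    rw [hcast, PySem.List.slice_to_natCast, hl, hk]
    exact List.take_left' (by simp [pvSep, ← hn])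

lemma pv_miss (link key : String) (n : Nat)
    (hne : PySem.Str.startswith link key = false) :
    PySem.Str.slice link none (some ((n : Int) + 3)) ≠ key := by
  intro he
  have hpre : key.toList <+: link.toList := by
    rw [← he, PySem.Str.toList_slice, PySem.Chars.slice_eq_listSlice]
    have hcast : ((n : Int) + 3) = ((n + 3 : Nat) : Int) := by push_cast; ring
    rw [hcast, PySem.List.slice_to_natCast]
    exact List.take_prefix _ _
  rw [PySem.Str.startswith_eq] at hne
  rw [← PySem.Chars.startswith_iff link.toList key.toList] at hpre
  simp [hpre] at hne

lemma pv_hit' (link scheme key : String) (n : Nat) (m : Int)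
    (hk : key.toList = scheme.toList ++ pvSep) (hn : scheme.toList.length = n)
    (hm : (n : Int) + 3 = m) (hns : ':' ∉ scheme.toList)
    (h : PySem.Str.startswith link key = true) :
    PySem.Chars.find link.toList [':', '/', '/'] = (n : Int) ∧
    PySem.Str.slice link none (some m) = key := by
  obtain ⟨hf, hs⟩ := pv_hit link scheme key n hk hn hns
    ((PySem.Chars.startswith_iff _ _).1 (by rw [← PySem.Str.startswith_eq]; exact h))
  refine ⟨?_, by rwa [hm] at hs⟩
  rw [PySem.Str.find_eq] at hf
  have hsep : ("://" : String).toList = [':', '/', '/'] := by decide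
  rwa [hsep] at hf

lemma pv_main : ∀ (link : String), get_protocol_type link = get_protocol_type_alt link := by
  intro link
  unfold get_protocol_type get_protocol_type_alt
  have hitems : (PySem.Dict.ofList
      [("vmess://", (0:Int)), ("vless://", 1), ("trojan://", 2),
       ("shadowsocks://", 3), ("ss://", 4), ("hysteria2://", 5)]).items =
      [("vmess://", 0), ("vless://", 1), ("trojan://", 2),
       ("shadowsocks://", 3), ("ss://", 4), ("hysteria2://", 5)] := by decide
  rw [hitems]
  cases h1 : PySem.Str.startswith link "vmess://" with
  | true =>
    obtain ⟨hf, hs⟩ := pv_hit' link "vmess" _ 5 8 (by decide) (by decide) (by decide) (by decide) h1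
    simp only [PySem.Str.startswith_eq] at h1 ; simp at h1
    simp [pvScanA, h1, hf, hs]; decide
  | false =>
  cases h2 : PySem.Str.startswith link "vless://" with
  | true =>
    obtain ⟨hf, hs⟩ := pv_hit' link "vless" _ 5 8 (by decide) (by decide) (by decide) (by decide) h2
    simp only [PySem.Str.startswith_eq] at h1 h2 ; simp at h1 h2
    simp [pvScanA, h1, h2, hf, hs]; decide
  | false =>
  cases h3 : PySem.Str.startswith link "trojan://" with
  | true =>
    obtain ⟨hf, hs⟩ := pv_hit' link "trojan" _ 6 9 (by decide) (by decide) (by decide) (by decide) h3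
    simp only [PySem.Str.startswith_eq] at h1 h2 h3 ; simp at h1 h2 h3
    simp [pvScanA, h1, h2, h3, hf, hs]; decide
  | false =>
  cases h4 : PySem.Str.startswith link "shadowsocks://" with
  | true =>
    obtain ⟨hf, hs⟩ := pv_hit' link "shadowsocks" _ 11 14 (by decide) (by decide) (by decide) (by decide) h4
    simp only [PySem.Str.startswith_eq] at h1 h2 h3 h4 ; simp at h1 h2 h3 h4
    simp [pvScanA, h1, h2, h3, h4, hf, hs]; decide
  | false =>
  cases h5 : PySem.Str.startswith link "ss://" with
  | true =>
    obtain ⟨hf, hs⟩ := pv_hit' link "ss" _ 2 5 (by decide) (by decide) (by decide) (by decide) h5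
    simp only [PySem.Str.startswith_eq] at h1 h2 h3 h4 h5 ; simp at h1 h2 h3 h4 h5
    simp [pvScanA, h1, h2, h3, h4, h5, hf, hs]; decide
  | false =>
  cases h6 : PySem.Str.startswith link "hysteria2://" with
  | true =>
    obtain ⟨hf, hs⟩ := pv_hit' link "hysteria2" _ 9 12 (by decide) (by decide) (by decide) (by decide) h6
    simp only [PySem.Str.startswith_eq] at h1 h2 h3 h4 h5 h6 ; simp at h1 h2 h3 h4 h5 h6
    simp [pvScanA, h1, h2, h3, h4, h5, h6, hf, hs]; decide
  | false =>
    simp only [PySem.Str.startswith_eq] at h1 h2 h3 h4 h5 h6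
    simp at h1 h2 h3 h4 h5 h6
    simp only [pvScanA]
    rw [if_neg (by simp [h1]), if_neg (by simp [h2]), if_neg (by simp [h3]),
        if_neg (by simp [h4]), if_neg (by simp [h5]), if_neg (by simp [h6])]
    by_cases hneg : PySem.Str.find link "://" = -1
    · simp at hneg; simp [hneg]
    · have h0 : 0 ≤ PySem.Str.find link "://" := by
        have := PySem.Chars.neg_one_le_find link.toList ("://").toList
        rw [PySem.Str.find_eq] at hneg ⊢
        omega
      obtain ⟨n, hfn⟩ : ∃ n : Nat, PySem.Str.find link "://" = (n : Int) :=
        ⟨(PySem.Str.find link "://").toNat, by omega⟩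
      have ne1 := pv_miss link "vmess://" n h1
      have ne2 := pv_miss link "vless://" n h2
      have ne3 := pv_miss link "trojan://" n h3
      have ne4 := pv_miss link "shadowsocks://" n h4
      have ne5 := pv_miss link "ss://" n h5
      have ne6 := pv_miss link "hysteria2://" n h6
      have hd : (PySem.Dict.ofList
          [("vmess://", (0:Int)), ("vless://", 1), ("trojan://", 2),
           ("shadowsocks://", 3), ("ss://", 4), ("hysteria2://", 5)] : PySem.Dict String Int) =
          PySem.Dict.mk
          [("vmess://", 0), ("vless://", 1), ("trojan://", 2),
           ("shadowsocks://", 3), ("ss://", 4), ("hysteria2://", 5)] := by decide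
      rw [hd, hfn]
      simp [PySem.Dict.getD_eq_get?_getD, PySem.Dict.get?_mk_cons,
            Ne.symm ne1, Ne.symm ne2, Ne.symm ne3, Ne.symm ne4, Ne.symm ne5, Ne.symm ne6]
      rfl

-- ===== VERDICT (by name: the statement is the Claim_ definition above) =====
theorem get_protocol_type_spec : Claim_equal_get_protocol_type := by
  intro link _
  unfold Spec_get_protocol_type
  exact pv_main link
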